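-- pv_equiv track=rewrite | github.com/mohammadfaiizan/ProjectI | DSA/Problem/Dynamic Programming/04_Longest_Subsequence/1626_Best_Team_With_No_Conflicts.py | best_team_score_segment_tree
-- ===== SOURCE A (Python) =====
-- def best_team_score_segment_tree(scores, ages):
--     """
--     SEGMENT TREE APPROACH:
--     =====================
--     Use segment tree for range maximum queries optimization.
--
--     Time Complexity: O(n log n) - sorting + segment tree
--     Space Complexity: O(n) - segment tree
--     """
--     n = len(scores)
--
--     # Sort by age, then by score
--     players = sorted(zip(ages, scores))
--
--     # Coordinate compression for scores
--     all_scores = sorted(set(score for _, score in players))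
--     score_to_idx = {score: i for i, score in enumerate(all_scores)}
--
--     class SegmentTree:
--         def __init__(self, size):
--             self.size = size
--             self.tree = [0] * (4 * size)
--
--         def update(self, node, start, end, idx, val):
--             if start == end:
--                 self.tree[node] = max(self.tree[node], val)
--             else:
--                 mid = (start + end) // 2
--                 if idx <= mid:
--                     self.update(2 * node, start, mid, idx, val)
--                 else:
--                     self.update(2 * node + 1, mid + 1, end, idx, val)
--
--                 self.tree[node] = max(self.tree[2 * node], self.tree[2 * node + 1])
--
--         def query(self, node, start, end, l, r):
--             if r < start or end < l:
--                 return 0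
--             if l <= start and end <= r:
--                 return self.tree[node]
--
--             mid = (start + end) // 2
--             left_max = self.query(2 * node, start, mid, l, r)
--             right_max = self.query(2 * node + 1, mid + 1, end, l, r)
--             return max(left_max, right_max)
--
--     seg_tree = SegmentTree(len(all_scores))
--     max_score = 0
--
--     for age, score in players:
--         score_idx = score_to_idx[score]
--
--         # Query maximum score for all scores <= current score
--         prev_max = seg_tree.query(1, 0, len(all_scores) - 1, 0, score_idx)
--
--         # Current team score
--         current_score = prev_max + score
--         max_score = max(max_score, current_score)
--
--         # Update segment tree
--         seg_tree.update(1, 0, len(all_scores) - 1, score_idx, current_score)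
--
--     return max_score
-- ===== SOURCE B (Python) =====
-- def best_team_score_segment_tree(scores, ages):
--     """Quadratic DP over age-sorted players: dp[i] = best team ending with player i."""
--     players = sorted(zip(ages, scores))
--     dp = []            # list of (score, best team total ending with that player)
--     best = 0
--     for _, score in players:
--         prev = 0
--         for s2, d in dp:
--             if s2 <= score:
--                 prev = max(prev, d)
--         cur = prev + score
--         dp.append((score, cur))
--         best = max(best, cur)
--     return best
-- ===== Notes on version B (the rewrite author's own statement) =====
-- stated objective: simpler
-- what changed: Replaced the coordinate-compressed segment tree (range-max queries/updates) by a plain quadratic DP list scanned per player for the best compatible predecessor.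
import Mathlib
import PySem

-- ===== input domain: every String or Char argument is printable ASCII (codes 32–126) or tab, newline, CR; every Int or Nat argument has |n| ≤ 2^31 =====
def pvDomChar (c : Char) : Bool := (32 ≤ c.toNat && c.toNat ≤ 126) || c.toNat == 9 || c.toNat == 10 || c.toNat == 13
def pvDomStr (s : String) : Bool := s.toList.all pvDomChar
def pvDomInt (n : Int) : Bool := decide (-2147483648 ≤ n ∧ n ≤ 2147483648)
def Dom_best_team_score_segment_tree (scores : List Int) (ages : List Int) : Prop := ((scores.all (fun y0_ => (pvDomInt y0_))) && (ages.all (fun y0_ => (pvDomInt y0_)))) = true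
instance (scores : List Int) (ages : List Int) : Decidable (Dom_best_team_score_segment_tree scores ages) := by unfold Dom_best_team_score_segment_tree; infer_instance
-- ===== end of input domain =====

-- B replaces A's coordinate-compressed segment tree by a plain quadratic DP list (simpler; not faster).

-- ===== PORT A =====
-- The Python segment tree stores its nodes in a list [0]*(4*size); every index the
-- recursion touches is in range for that list, so the tree is modelled as a total map
-- Nat → Int (exact on all admitted inputs).  The recursions update/query halve the
-- segment [s,e], so their depth is at most e+1-s ≤ size: the fuel `size` passed at each
-- call site is never exhausted and the fuel-free Python recursion is reproduced exactly.
def stUpdate : Nat → (Nat → Int) → Nat → Nat → Nat → Nat → Int → (Nat → Int)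
  | 0, t, _, _, _, _, _ => t
  | f+1, t, node, s, e, i, v =>
    if s = e then
      fun j => if j = node then max (t node) v else t j
    else
      let mid := (s + e) / 2
      let t' := if i ≤ mid then stUpdate f t (2*node) s mid i v
                else stUpdate f t (2*node+1) (mid+1) e i v
      fun j => if j = node then max (t' (2*node)) (t' (2*node+1)) else t' j

def stQuery : Nat → (Nat → Int) → Nat → Nat → Nat → Nat → Nat → Int
  | 0, _, _, _, _, _, _ => 0
  | f+1, t, node, s, e, l, r =>
    if r < s ∨ e < l then 0
    else if l ≤ s ∧ e ≤ r then t node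
    else
      let mid := (s + e) / 2
      max (stQuery f t (2*node) s mid l r) (stQuery f t (2*node+1) (mid+1) e l r)

def best_team_score_segment_tree (scores : List Int) (ages : List Int) : Int :=
  let players := PySem.List.sorted2 (ages.zip scores) (fun p => p.1) (fun p => p.2)
  let all_scores := PySem.List.sorted (PySem.Set.ofList (players.map (fun p => p.2))) (fun x => x) false
  let score_to_idx := (PySem.List.enumerate all_scores 0).foldl
      (fun (d : PySem.Dict Int Int) p => d.insert p.2 p.1) PySem.Dict.empty
  let m := all_scores.length
  (players.foldl (fun (st : (Nat → Int) × Int) p =>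
      let si := (score_to_idx.getD p.2 0).toNat
      let prev := stQuery m st.1 1 0 (m-1) 0 si
      let cur := prev + p.2
      (stUpdate m st.1 1 0 (m-1) si cur, max st.2 cur)) (fun _ => 0, 0)).2

-- ===== PORT B =====
def best_team_score_segment_tree_alt (scores : List Int) (ages : List Int) : Int :=
  let players := PySem.List.sorted2 (ages.zip scores) (fun p => p.1) (fun p => p.2)
  (players.foldl (fun (st : List (Int × Int) × Int) p =>
      let prev := st.1.foldl (fun acc q => if q.1 ≤ p.2 then max acc q.2 else acc) 0
      let cur := prev + p.2
      (st.1 ++ [(p.2, cur)], max st.2 cur)) ([], 0)).2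

-- ===== PRECONDITION & SPEC =====
def Spec_best_team_score_segment_tree (scores : List Int) (ages : List Int) (out : Int) : Prop := out = best_team_score_segment_tree_alt scores ages
instance (scores : List Int) (ages : List Int) (out : Int) : Decidable (Spec_best_team_score_segment_tree scores ages out) := by unfold Spec_best_team_score_segment_tree; infer_instance

-- ===== CLAIM (what is proved, stated in full; the proofs are below) =====
def Claim_equal_best_team_score_segment_tree : Prop := ∀ (scores : List Int) (ages : List Int), Dom_best_team_score_segment_tree scores ages → Spec_best_team_score_segment_tree scores ages (best_team_score_segment_tree scores ages)

-- ===== LEMMAS AND PROOFS =====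

-- j is a node of the subtree rooted at k (halving j some number of times reaches k)
def desc (j k : Nat) : Prop := ∃ c, j / 2 ^ c = k

-- the tree t correctly summarises the leaf values g over the segment [s,e] at node `node`
def SegOK : Nat → (Nat → Int) → (Nat → Int) → Nat → Nat → Nat → Prop
  | 0, _, _, _, _, _ => False
  | f+1, t, g, node, s, e =>
    if s = e then t node = g s
    else t node = max (t (2*node)) (t (2*node+1)) ∧
      SegOK f t g (2*node) s ((s+e)/2) ∧ SegOK f t g (2*node+1) ((s+e)/2+1) e

-- max of g over [a,b], padded with 0
def segMax (g : Nat → Int) (a b : Nat) : Int := ((List.range' a (b+1-a)).map g).foldl max 0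

-- value at compressed index i contributed by the dp list
def leafG (idx : Int → Nat) (dp : List (Int × Int)) (i : Nat) : Int :=
  dp.foldl (fun acc q => if idx q.1 = i then max acc q.2 else acc) 0

theorem desc_le {j k : Nat} (h : desc j k) : k ≤ j := by
  obtain ⟨c, rfl⟩ := h; exact Nat.div_le_self _ _

theorem desc_half {j m : Nat} (h : desc j m) : desc j (m / 2) := by
  obtain ⟨c, rfl⟩ := h
  exact ⟨c + 1, by rw [pow_succ, ← Nat.div_div_eq_div_mul]⟩

theorem desc_left {j k : Nat} (h : desc j (2*k)) : desc j k := by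
  have := desc_half h
  rwa [Nat.mul_div_cancel_left k (by norm_num)] at this

theorem desc_right {j k : Nat} (h : desc j (2*k+1)) : desc j k := by
  have := desc_half h
  have e : (2*k+1) / 2 = k := by omega
  rwa [e] at this

theorem desc_sib {j k : Nat} (hk : 0 < k) (h1 : desc j (2*k)) (h2 : desc j (2*k+1)) : False := by
  obtain ⟨a, ha⟩ := h1
  obtain ⟨b, hb⟩ := h2
  rcases lt_trichotomy a b with hab | hab | hab
  · have e : j / 2 ^ b = (j / 2 ^ a) / 2 ^ (b - a) := by
      rw [Nat.div_div_eq_div_mul, ← pow_add]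
      have : a + (b - a) = b := by omega
      rw [this]
    rw [e, ha] at hb
    have h2b : 2 ≤ 2 ^ (b - a) := by
      calc 2 = 2 ^ 1 := rfl
      _ ≤ 2 ^ (b - a) := Nat.pow_le_pow_right (by norm_num) (by omega)
    have h2' : 2 * k / 2 ^ (b - a) ≤ 2 * k / 2 := Nat.div_le_div_left h2b (by norm_num)
    omega
  · rw [hab, hb] at ha; omega
  · have e : j / 2 ^ a = (j / 2 ^ b) / 2 ^ (a - b) := by
      rw [Nat.div_div_eq_div_mul, ← pow_add]
      have : b + (a - b) = a := by omega
      rw [this]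
    rw [e, hb] at ha
    have h2b : 2 ≤ 2 ^ (a - b) := by
      calc 2 = 2 ^ 1 := rfl
      _ ≤ 2 ^ (a - b) := Nat.pow_le_pow_right (by norm_num) (by omega)
    have h2' : (2 * k + 1) / 2 ^ (a - b) ≤ (2 * k + 1) / 2 := Nat.div_le_div_left h2b (by norm_num)
    omega

theorem desc_self (k : Nat) : desc k k := ⟨0, by simp⟩

theorem desc_childl (k : Nat) : desc (2*k) k :=
  ⟨1, by simp [Nat.mul_div_cancel_left k (by norm_num : 0 < 2)]⟩

theorem desc_childr (k : Nat) : desc (2*k+1) k := ⟨1, by omega⟩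

theorem segMax_empty (g : Nat → Int) {a b : Nat} (h : b + 1 ≤ a) : segMax g a b = 0 := by
  have e : b + 1 - a = 0 := by omega
  simp [segMax, e]

theorem segMax_nonneg (g : Nat → Int) (a b : Nat) : 0 ≤ segMax g a b :=
  (PySem.List.le_foldl_max _ 0).1

theorem segMax_single (g : Nat → Int) (a : Nat) : segMax g a a = max 0 (g a) := by
  have e : a + 1 - a = 1 := by omega
  simp [segMax, e, List.range'_one]

theorem foldl_max_shift (l : List Int) (c : Int) (hc : 0 ≤ c) :
    l.foldl max c = max c (l.foldl max 0) := by
  have := List.foldl_assoc (op := (max : Int → Int → Int)) (l := l) (a₁ := c) (a₂ := 0)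
  rw [max_eq_left hc] at this
  exact this

theorem segMax_split (g : Nat → Int) {a c b : Nat} (h1 : a ≤ c + 1) (h2 : c ≤ b) :
    segMax g a b = max (segMax g a c) (segMax g (c+1) b) := by
  have e : List.range' a (b+1-a) = List.range' a (c+1-a) ++ List.range' (c+1) (b-c) := by
    have e1 : a + (c+1-a) = c + 1 := by omega
    have e2 : (c+1-a) + (b-c) = b+1-a := by omega
    rw [← e2, ← List.range'_append_1, e1]
  have e2 : b + 1 - (c + 1) = b - c := by omega
  simp only [segMax, e2]
  rw [e, List.map_append, List.foldl_append]
  exact foldl_max_shift _ _ ((PySem.List.le_foldl_max _ 0).1)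

theorem segMax_congr {g g' : Nat → Int} {a b : Nat} (h : ∀ i, a ≤ i → i ≤ b → g i = g' i) :
    segMax g a b = segMax g' a b := by
  unfold segMax
  congr 1
  apply List.map_congr_left
  intro i hi
  have := List.mem_range'_1.mp hi
  exact h i this.1 (by omega)

theorem segMax_update {g : Nat → Int} {j a b : Nat} (v : Int) (hja : a ≤ j) (hjb : j ≤ b) :
    segMax (fun i => if i = j then max (g i) v else g i) a b = max (segMax g a b) v := by
  induction b with
  | zero =>
      have ha : a = 0 := by omega
      have hj : j = 0 := by omega
      subst ha; subst hj
      rw [segMax_single, segMax_single]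
      show max 0 (if (0:Nat) = 0 then max (g 0) v else g 0) = _
      rw [if_pos rfl]; omega
  | succ b ih =>
      by_cases hbj : j = b + 1
      · subst hbj
        by_cases hab : a = b + 1
        · subst hab
          rw [segMax_single, segMax_single]
          show max 0 (if b + 1 = b + 1 then max (g (b+1)) v else g (b+1)) = _
          rw [if_pos rfl]; omega
        · have h1 : a ≤ (b + 1 - 1) + 1 := by omega
          have h2 : b + 1 - 1 ≤ b + 1 := by omega
          have e : (b + 1 - 1) + 1 = b + 1 := by omega
          have hc : segMax (fun i => if i = b + 1 then max (g i) v else g i) a (b + 1 - 1)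
              = segMax g a (b + 1 - 1) := by
            apply segMax_congr
            intro i hi1 hi2
            show (if i = b + 1 then max (g i) v else g i) = g i
            rw [if_neg (by omega)]
          rw [segMax_split _ h1 h2, segMax_split _ h1 h2, e, segMax_single, segMax_single, hc]
          show max (segMax g a (b+1-1)) (max 0 (if b + 1 = b + 1 then max (g (b+1)) v else g (b+1))) = _
          rw [if_pos rfl]; omega
      · have hjb' : j ≤ b := by omega
        rw [segMax_split _ (by omega : a ≤ b + 1) (by omega : b ≤ b + 1),
            segMax_split _ (by omega : a ≤ b + 1) (by omega : b ≤ b + 1),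
            segMax_single, segMax_single, ih hjb']
        show max (max (segMax g a b) v) (max 0 (if b + 1 = j then max (g (b+1)) v else g (b+1))) = _
        rw [if_neg (by omega)]; omega

theorem SegOK_leaf {f : Nat} {t g : Nat → Int} {node s e : Nat} (hse : s = e) :
    SegOK (f+1) t g node s e ↔ t node = g s := by simp [SegOK, hse]

theorem SegOK_node {f : Nat} {t g : Nat → Int} {node s e : Nat} (hse : ¬ s = e) :
    SegOK (f+1) t g node s e ↔
      (t node = max (t (2*node)) (t (2*node+1)) ∧
       SegOK f t g (2*node) s ((s+e)/2) ∧ SegOK f t g (2*node+1) ((s+e)/2+1) e) := by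
  simp [SegOK, hse]

theorem stUpdate_leaf {f : Nat} {t : Nat → Int} {node s e i : Nat} {v : Int} (hse : s = e) :
    stUpdate (f+1) t node s e i v = fun j => if j = node then max (t node) v else t j := by
  simp [stUpdate, hse]

theorem stUpdate_nodeL {f : Nat} {t : Nat → Int} {node s e i : Nat} {v : Int}
    (hse : ¬ s = e) (him : i ≤ (s+e)/2) :
    stUpdate (f+1) t node s e i v =
      fun j => if j = node
        then max (stUpdate f t (2*node) s ((s+e)/2) i v (2*node))
                 (stUpdate f t (2*node) s ((s+e)/2) i v (2*node+1))
        else stUpdate f t (2*node) s ((s+e)/2) i v j := by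
  simp [stUpdate, hse, him]

theorem stUpdate_nodeR {f : Nat} {t : Nat → Int} {node s e i : Nat} {v : Int}
    (hse : ¬ s = e) (him : ¬ i ≤ (s+e)/2) :
    stUpdate (f+1) t node s e i v =
      fun j => if j = node
        then max (stUpdate f t (2*node+1) ((s+e)/2+1) e i v (2*node))
                 (stUpdate f t (2*node+1) ((s+e)/2+1) e i v (2*node+1))
        else stUpdate f t (2*node+1) ((s+e)/2+1) e i v j := by
  simp [stUpdate, hse, him]

theorem seg_le {f : Nat} {t g : Nat → Int} {node s e : Nat} (h : SegOK f t g node s e) : s ≤ e := by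
  induction f generalizing t g node s e with
  | zero => exact h.elim
  | succ f ih =>
      by_cases hse : s = e
      · omega
      · obtain ⟨-, h1, h2⟩ := (SegOK_node hse).mp h
        have := ih h1
        have := ih h2
        omega

theorem seg_congr_t {f : Nat} {t t' g : Nat → Int} {node s e : Nat}
    (ht : ∀ j, desc j node → t j = t' j) (h : SegOK f t g node s e) : SegOK f t' g node s e := by
  induction f generalizing t t' g node s e with
  | zero => exact h.elim
  | succ f ih =>
      by_cases hse : s = e
      · rw [SegOK_leaf hse] at h ⊢
        rw [← ht node (desc_self node)]; exact h
      · obtain ⟨heq, h1, h2⟩ := (SegOK_node hse).mp h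
        refine (SegOK_node hse).mpr ⟨?_, ?_, ?_⟩
        · rw [← ht node (desc_self node), ← ht _ (desc_childl node), ← ht _ (desc_childr node)]
          exact heq
        · exact ih (fun j hj => ht j (desc_left hj)) h1
        · exact ih (fun j hj => ht j (desc_right hj)) h2

theorem seg_congr_g {f : Nat} {t g g' : Nat → Int} {node s e : Nat}
    (hg : ∀ i, s ≤ i → i ≤ e → g i = g' i) (h : SegOK f t g node s e) : SegOK f t g' node s e := by
  induction f generalizing t g g' node s e with
  | zero => exact h.elim
  | succ f ih =>
      by_cases hse : s = e
      · rw [SegOK_leaf hse] at h ⊢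
        rw [← hg s le_rfl (by omega)]; exact h
      · obtain ⟨heq, h1, h2⟩ := (SegOK_node hse).mp h
        have hm1 : s ≤ (s+e)/2 := seg_le h1
        have hm2 : (s+e)/2 + 1 ≤ e := seg_le h2
        refine (SegOK_node hse).mpr ⟨heq, ?_, ?_⟩
        · exact ih (fun i hi1 hi2 => hg i hi1 (by omega)) h1
        · exact ih (fun i hi1 hi2 => hg i (by omega) hi2) h2

theorem seg_init {f : Nat} : ∀ {s e node : Nat}, s ≤ e → e + 1 - s ≤ f →
    SegOK f (fun _ => 0) (fun _ => 0) node s e := by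
  induction f with
  | zero => intro s e node hse hf; omega
  | succ f ih =>
      intro s e node hse hf
      by_cases he : s = e
      · rw [SegOK_leaf he]
      · refine (SegOK_node he).mpr ⟨by simp, ?_, ?_⟩
        · exact ih (by omega) (by omega)
        · exact ih (by omega) (by omega)

theorem seg_root {f : Nat} {t g : Nat → Int} {node s e : Nat}
    (h : SegOK f t g node s e) (hg : ∀ i, 0 ≤ g i) : t node = segMax g s e := by
  induction f generalizing t g node s e with
  | zero => exact h.elim
  | succ f ih =>
      by_cases hse : s = e
      · rw [SegOK_leaf hse] at h
        rw [h, hse, segMax_single]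
        exact (max_eq_right (hg e)).symm
      · obtain ⟨heq, h1, h2⟩ := (SegOK_node hse).mp h
        have hm1 : s ≤ (s+e)/2 := seg_le h1
        have hm2 : (s+e)/2 + 1 ≤ e := seg_le h2
        rw [heq, ih h1 hg, ih h2 hg,
            ← segMax_split g (by omega : s ≤ (s+e)/2 + 1) (by omega : (s+e)/2 ≤ e)]

theorem seg_query {f : Nat} {t g : Nat → Int} {node s e : Nat}
    (h : SegOK f t g node s e) (hg : ∀ i, 0 ≤ g i) (l r : Nat) :
    stQuery f t node s e l r = if r < s ∨ e < l then 0 else segMax g (max s l) (min e r) := by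
  induction f generalizing t g node s e with
  | zero => exact h.elim
  | succ f ih =>
      simp only [stQuery]
      split_ifs with hd hc
      · rfl
      · rw [seg_root h hg]
        congr 1 <;> omega
      · have hse : ¬ s = e := by
          intro hse; subst hse; omega
        obtain ⟨heq, h1, h2⟩ := (SegOK_node hse).mp h
        have hm1 : s ≤ (s+e)/2 := seg_le h1
        have hm2 : (s+e)/2 + 1 ≤ e := seg_le h2
        rw [ih h1 hg, ih h2 hg]
        set mid := (s+e)/2 with hmid
        by_cases hlm : l ≤ mid
        · by_cases hrm : mid + 1 ≤ r
          · rw [if_neg (by omega), if_neg (by omega),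
                segMax_split g (show max s l ≤ mid + 1 by omega) (show mid ≤ min e r by omega),
                show min mid r = mid by omega, show max (mid+1) l = mid + 1 by omega]
          · rw [if_neg (by omega), if_pos (by omega),
                show min mid r = min e r by omega]
            exact max_eq_left (segMax_nonneg _ _ _)
        · by_cases hrm : mid + 1 ≤ r
          · rw [if_pos (by omega), if_neg (by omega),
                show max (mid+1) l = max s l by omega]
            exact max_eq_right (segMax_nonneg _ _ _)
          · rw [if_pos (by omega), if_pos (by omega),
                segMax_empty g (show min e r + 1 ≤ max s l by omega)]
            simp

theorem stUpdate_out {f : Nat} {t : Nat → Int} {node s e i : Nat} {v : Int}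
    (j : Nat) (hj : ¬ desc j node) : stUpdate f t node s e i v j = t j := by
  induction f generalizing t node s e i with
  | zero => rfl
  | succ f ih =>
      have hjn : j ≠ node := fun hh => hj (hh ▸ desc_self j)
      by_cases hse : s = e
      · rw [stUpdate_leaf hse]
        simp [hjn]
      · by_cases him : i ≤ (s+e)/2
        · rw [stUpdate_nodeL hse him]
          simp only [hjn, if_false]
          exact ih (fun hh => hj (desc_left hh))
        · rw [stUpdate_nodeR hse him]
          simp only [hjn, if_false]
          exact ih (fun hh => hj (desc_right hh))

theorem seg_update {f : Nat} {t g : Nat → Int} {node s e i : Nat} {v : Int}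
    (hn : 0 < node) (h : SegOK f t g node s e) (h1 : s ≤ i) (h2 : i ≤ e) :
    SegOK f (stUpdate f t node s e i v) (fun j => if j = i then max (g j) v else g j) node s e := by
  induction f generalizing t g node s e i with
  | zero => exact h.elim
  | succ f ih =>
      by_cases hse : s = e
      · rw [SegOK_leaf hse] at h ⊢
        rw [stUpdate_leaf hse]
        have hsi : s = i := by omega
        simp [h, hsi]
      · obtain ⟨heq, hL, hR⟩ := (SegOK_node hse).mp h
        have hm1 : s ≤ (s+e)/2 := seg_le hL
        have hm2 : (s+e)/2 + 1 ≤ e := seg_le hR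
        have hnodeL : node < 2*node := by omega
        by_cases him : i ≤ (s+e)/2
        · rw [stUpdate_nodeL hse him]
          refine (SegOK_node hse).mpr ⟨?_, ?_, ?_⟩
          · rw [if_pos rfl, if_neg (by omega), if_neg (by omega)]
          · -- left child: updated by IH, then pass to the outer function
            have hU := ih (by omega : 0 < 2*node) hL h1 him
            refine seg_congr_t (fun j hj => ?_) hU
            rw [if_neg (by intro hh; subst hh; exact absurd (desc_le hj) (by omega))]
          · -- right child: untouched
            have hg' : SegOK f t (fun j => if j = i then max (g j) v else g j)
                (2*node+1) ((s+e)/2+1) e := by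
              refine seg_congr_g (fun k hk1 hk2 => ?_) hR
              rw [if_neg (by omega)]
            refine seg_congr_t (fun j hj => ?_) hg'
            rw [if_neg (by intro hh; subst hh; exact absurd (desc_le hj) (by omega))]
            exact (stUpdate_out j (fun hh => desc_sib hn hh hj)).symm
        · rw [stUpdate_nodeR hse him]
          refine (SegOK_node hse).mpr ⟨?_, ?_, ?_⟩
          · rw [if_pos rfl, if_neg (by omega), if_neg (by omega)]
          · have hg' : SegOK f t (fun j => if j = i then max (g j) v else g j)
                (2*node) s ((s+e)/2) := by
              refine seg_congr_g (fun k hk1 hk2 => ?_) hL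
              rw [if_neg (by omega)]
            refine seg_congr_t (fun j hj => ?_) hg'
            rw [if_neg (by intro hh; subst hh; exact absurd (desc_le hj) (by omega))]
            exact (stUpdate_out j (fun hh => desc_sib hn hj hh)).symm
          · have hU := ih (by omega : 0 < 2*node+1) hR (by omega) h2
            refine seg_congr_t (fun j hj => ?_) hU
            rw [if_neg (by intro hh; subst hh; exact absurd (desc_le hj) (by omega))]

theorem foldl_condmax_ge {α : Type} (p : α → Prop) [DecidablePred p] (fv : α → Int) :
    ∀ (l : List α) (a : Int), a ≤ l.foldl (fun acc x => if p x then max acc (fv x) else acc) a := by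
  intro l
  induction l with
  | nil => intro a; exact le_rfl
  | cons x xs ih =>
      intro a
      simp only [List.foldl_cons]
      split_ifs with hx
      · exact le_trans (le_max_left a (fv x)) (ih _)
      · exact ih a

theorem leafG_nonneg (idx : Int → Nat) (dp : List (Int × Int)) (i : Nat) : 0 ≤ leafG idx dp i :=
  foldl_condmax_ge (fun (q : Int × Int) => idx q.1 = i) (fun q => q.2) dp 0

theorem leafG_append (idx : Int → Nat) (dp : List (Int × Int)) (q : Int × Int) :
    leafG idx (dp ++ [q]) = fun i => if i = idx q.1 then max (leafG idx dp i) q.2 else leafG idx dp i := by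
  funext i
  show (dp ++ [q]).foldl _ 0 = _
  rw [List.foldl_append]
  simp only [List.foldl_cons, List.foldl_nil]
  by_cases hq : idx q.1 = i
  · rw [if_pos hq, if_pos hq.symm]; rfl
  · rw [if_neg hq, if_neg (fun hh => hq hh.symm)]; rfl

theorem segMax_zero (r : Nat) : segMax (fun _ => 0) 0 r = 0 := by
  induction r with
  | zero => rw [segMax_single]; simp
  | succ r ih =>
      rw [segMax_split _ (by omega : 0 ≤ r + 1) (by omega : r ≤ r + 1), ih, segMax_single]
      simp

theorem bucket_flat (idx : Int → Nat) (r : Nat) : ∀ (dp : List (Int × Int)),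
    segMax (leafG idx dp) 0 r = dp.foldl (fun acc q => if idx q.1 ≤ r then max acc q.2 else acc) 0 := by
  intro dp
  induction dp using List.reverseRecOn with
  | nil =>
      rw [show leafG idx [] = (fun _ => 0) from rfl, segMax_zero]
      rfl
  | append_singleton dp q ih =>
      rw [leafG_append, List.foldl_append]
      simp only [List.foldl_cons, List.foldl_nil]
      by_cases hq : idx q.1 ≤ r
      · rw [segMax_update q.2 (by omega) hq, ih, if_pos hq]
      · rw [segMax_congr (g' := leafG idx dp) (fun i hi1 hi2 => by
            show (if i = idx q.1 then _ else _) = _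
            rw [if_neg (by omega)]), ih, if_neg hq]

theorem idxOf_mono {L : List Int} (hlt : L.Pairwise (· < ·)) {a b : Int}
    (ha : a ∈ L) (hb : b ∈ L) : a ≤ b ↔ L.idxOf a ≤ L.idxOf b := by
  have ha' : L.idxOf a < L.length := List.idxOf_lt_length_of_mem ha
  have hb' : L.idxOf b < L.length := List.idxOf_lt_length_of_mem hb
  have hga : L[L.idxOf a] = a := List.getElem_idxOf ha'
  have hgb : L[L.idxOf b] = b := List.getElem_idxOf hb'
  have hmono : ∀ i j (hi : i < L.length) (hj : j < L.length), i < j → L[i] < L[j] :=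
    fun i j hi hj hij => List.pairwise_iff_getElem.mp hlt i j hi hj hij
  constructor
  · intro hab
    by_contra hc
    have hc' : L.idxOf b < L.idxOf a := by omega
    have := hmono _ _ hb' ha' hc'
    rw [hga, hgb] at this
    omega
  · intro hij
    rcases Nat.lt_or_ge (L.idxOf a) (L.idxOf b) with hlt' | hge
    · have := hmono _ _ ha' hb' hlt'
      rw [hga, hgb] at this
      omega
    · have heq : L.idxOf a = L.idxOf b := by omega
      have : a = b := by rw [← hga, ← hgb]; congr 1
      omega

theorem loop_eq (L : List Int) (hlt : L.Pairwise (· < ·)) (hm : 0 < L.length)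
    (sidx : Int → Nat) (hsidx : ∀ s ∈ L, sidx s = L.idxOf s) :
    ∀ (rest : List (Int × Int)) (t : Nat → Int) (dp : List (Int × Int)) (ms : Int),
    (∀ p ∈ rest, p.2 ∈ L) → (∀ q ∈ dp, q.1 ∈ L) →
    SegOK L.length t (leafG (fun x => L.idxOf x) dp) 1 0 (L.length - 1) →
    (rest.foldl (fun (st : (Nat → Int) × Int) p =>
        (stUpdate L.length st.1 1 0 (L.length-1) (sidx p.2)
           (stQuery L.length st.1 1 0 (L.length-1) 0 (sidx p.2) + p.2),
         max st.2 (stQuery L.length st.1 1 0 (L.length-1) 0 (sidx p.2) + p.2))) (t, ms)).2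
    = (rest.foldl (fun (st : List (Int × Int) × Int) p =>
        (st.1 ++ [(p.2, st.1.foldl (fun acc q => if q.1 ≤ p.2 then max acc q.2 else acc) 0 + p.2)],
         max st.2 (st.1.foldl (fun acc q => if q.1 ≤ p.2 then max acc q.2 else acc) 0 + p.2))) (dp, ms)).2 := by
  intro rest
  induction rest with
  | nil => intro t dp ms _ _ _; rfl
  | cons p rest ih =>
      intro t dp ms hrest hdp hseg
      have hpL : p.2 ∈ L := hrest p (List.mem_cons_self)
      have hsi : L.idxOf p.2 < L.length := List.idxOf_lt_length_of_mem hpL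
      have hgnn : ∀ i, 0 ≤ leafG (fun x => L.idxOf x) dp i := leafG_nonneg _ dp
      -- the segment-tree query equals B's scan of the dp list
      have hq : stQuery L.length t 1 0 (L.length-1) 0 (L.idxOf p.2)
          = dp.foldl (fun acc q => if q.1 ≤ p.2 then max acc q.2 else acc) 0 := by
        rw [seg_query hseg hgnn 0 (L.idxOf p.2), if_neg (by omega),
            show max 0 0 = 0 from rfl,
            show min (L.length - 1) (L.idxOf p.2) = L.idxOf p.2 by omega,
            bucket_flat]
        apply PySem.List.foldl_congr_mem
        intro acc q hqdp
        have hqL : q.1 ∈ L := hdp q hqdp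
        by_cases hle : q.1 ≤ p.2
        · rw [if_pos ((idxOf_mono hlt hqL hpL).mp hle), if_pos hle]
        · rw [if_neg (fun hc => hle ((idxOf_mono hlt hqL hpL).mpr hc)), if_neg hle]
      simp only [List.foldl_cons]
      rw [hsidx p.2 hpL, hq]
      apply ih
      · exact fun q hh => hrest q (List.mem_cons_of_mem _ hh)
      · intro q hh
        rcases List.mem_append.mp hh with hh | hh
        · exact hdp q hh
        · simp only [List.mem_singleton] at hh
          rw [hh]
          exact hpL
      · rw [leafG_append]
        exact seg_update (by omega) hseg (by omega) (by omega)

-- ===== VERDICT (by name: the statement is the Claim_ definition above) =====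
theorem best_team_score_segment_tree_spec : Claim_equal_best_team_score_segment_tree := by
  intro scores ages _
  unfold Spec_best_team_score_segment_tree
  simp only [best_team_score_segment_tree, best_team_score_segment_tree_alt]
  set P := PySem.List.sorted2 (ages.zip scores) (fun p => p.1) (fun p => p.2) with hP
  set L := PySem.List.sorted (PySem.Set.ofList (P.map (fun p => p.2))) (fun x => x) false with hLdef
  set D := (PySem.List.enumerate L 0).foldl
      (fun (d : PySem.Dict Int Int) q => d.insert q.2 q.1) PySem.Dict.empty with hDdef
  have hlt : L.Pairwise (· < ·) := PySem.List.sorted_ofList_pairwise_lt _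
  have hmemP : ∀ p ∈ P, p.2 ∈ L := by
    intro p hp
    exact (PySem.List.mem_sorted _ _ _ _).mpr
      ((PySem.Set.mem_ofList _ _).mpr (List.mem_map_of_mem hp))
  have hnodup : L.Nodup := hlt.imp (fun h => ne_of_lt h)
  have hD : ∀ s ∈ L, D.getD s 0 = (L.idxOf s : Int) := by
    intro s hs
    have hitems : D.items
        = PySem.Dict.empty.items ++ (PySem.List.enumerate L 0).map (fun q => (q.2, q.1)) := by
      apply PySem.Dict.items_foldl_insert_fresh (PySem.List.enumerate L 0)
        (fun q => q.2) (fun q => q.1) PySem.Dict.empty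
      · intro a _; exact PySem.Dict.contains_empty _
      · rw [PySem.List.map_snd_enumerate]; exact hnodup
    have hkeys : D.keys = L := by
      show D.items.map (fun q => q.1) = L
      rw [hitems, List.map_append, List.map_map]
      show PySem.Dict.empty.items.map _ ++ (PySem.List.enumerate L 0).map (fun q => q.2) = L
      rw [PySem.List.map_snd_enumerate]
      rfl
    have hkN : D.keys.Nodup := by rw [hkeys]; exact hnodup
    have hmemIt : (s, (L.idxOf s : Int)) ∈ D.items := by
      rw [hitems]
      apply List.mem_append_right
      apply List.mem_map.mpr
      refine ⟨((L.idxOf s : Int), s), ?_, rfl⟩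
      rw [PySem.List.mem_enumerate_iff]
      exact ⟨L.idxOf s, List.idxOf_lt_length_of_mem hs, by
        rw [List.getElem_idxOf (List.idxOf_lt_length_of_mem hs)]; simp⟩
    exact PySem.Dict.getD_of_mem_items D hmemIt hkN 0
  by_cases hP0 : P = []
  · rw [hP0]; rfl
  · have hm : 0 < L.length := by
      obtain ⟨p, hp⟩ := List.exists_mem_of_ne_nil P hP0
      exact List.length_pos_of_mem (hmemP p hp)
    exact loop_eq L hlt hm (fun s => (D.getD s 0).toNat)
      (fun s hs => by show (D.getD s 0).toNat = L.idxOf s; rw [hD s hs]; exact Int.toNat_natCast _)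
      P (fun _ => 0) [] 0 hmemP (by intro q h; cases h)
      (by rw [show leafG (fun x => L.idxOf x) [] = (fun _ => 0) from rfl]
          exact seg_init (by omega) (by omega))
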